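-- pv_equiv track=rewrite | github.com/Jv131103/estudos_python | problemas/exercicio374.py | agrupar_por_inicial
-- ===== SOURCE A (Python) =====
-- def agrupar_por_inicial(lista):
--     d = {}
--
--     for palavras in lista:
--         palavras = palavras.lower()
--         primeira_letra = palavras[0]
--         if primeira_letra not in d:
--             d[primeira_letra] = [palavras]
--         else:
--             if palavras not in d[primeira_letra]:
--                 d[primeira_letra].append(palavras)
--
--     return d
-- ===== SOURCE B (Python) =====
-- def agrupar_por_inicial(lista):
--     # Declarative characterization: keys = initials at their first occurrence (in order),
--     # bucket of a key = words with that initial at their first occurrence (in order).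
--     words = [p.lower() for p in lista]
--     return {
--         w[0]: [v for j, v in enumerate(words)
--                if v[0] == w[0] and v not in words[:j]]
--         for i, w in enumerate(words)
--         if w[0] not in [x[0] for x in words[:i]]
--     }
-- ===== Notes on version B (the rewrite author's own statement) =====
-- stated objective: alternative
-- what changed: A builds the result with one stateful pass mutating a dict (inner membership scan of the growing bucket); B is a stateless declarative characterization: a nested dict/list comprehension that keeps an occurrence exactly when it is the first of its kind, using prefix-membership tests (w[0] not in initials of words[:i], v not in words[:j]) instead of any accumulator.
import Mathlib
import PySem

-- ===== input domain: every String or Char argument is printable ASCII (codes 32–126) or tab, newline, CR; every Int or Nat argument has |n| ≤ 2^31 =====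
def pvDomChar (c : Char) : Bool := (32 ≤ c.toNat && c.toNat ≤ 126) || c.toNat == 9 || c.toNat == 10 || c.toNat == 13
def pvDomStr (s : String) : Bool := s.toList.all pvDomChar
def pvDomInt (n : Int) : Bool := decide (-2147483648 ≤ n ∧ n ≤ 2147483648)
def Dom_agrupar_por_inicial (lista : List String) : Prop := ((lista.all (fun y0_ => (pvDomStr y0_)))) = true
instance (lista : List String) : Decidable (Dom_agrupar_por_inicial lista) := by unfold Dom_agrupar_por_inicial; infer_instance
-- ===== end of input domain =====

-- B replaces A's stateful single-pass dict building by a stateless declarative characterization: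
-- nested comprehensions keeping exactly the first occurrence of each initial / each word (alternative decomposition, not faster).


-- ===== PORT A =====
-- one iteration of A's for-loop, on the already-lowercased word
def pvStepA (d : PySem.Dict String (List String)) (palavras : String) :
    PySem.Dict String (List String) :=
  match PySem.Str.pyGet? palavras 0 with
  | none => d          -- palavras[0] raises IndexError: excluded by Pre_
  | some c =>
    match d.get? (String.singleton c) with
    | none => d.insert (String.singleton c) [palavras]
    | some l => if palavras ∈ l then d else d.insert (String.singleton c) (l ++ [palavras])

def agrupar_por_inicial (lista : List String) : List (String × List String) :=
  (lista.foldl (fun d p => pvStepA d (PySem.Str.lower p)) PySem.Dict.empty).items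

-- ===== PORT B =====
-- w[0] as the 1-character string Python indexes out ("" only where Python raises IndexError, excluded by Pre_)
def pvKf (w : String) : String :=
  match PySem.Str.pyGet? w 0 with
  | some c => String.singleton c
  | none => ""

-- the value comprehension  [v for j, v in enumerate(words) if v[0] == k and v not in words[:j]]
-- (words[:j] with the nonnegative enumerate index j is words.take j)
def pvBucketB (words : List String) (k : String) : List String :=
  ((PySem.List.enumerate words 0).filter
    (fun q => pvKf q.2 == k && !decide (q.2 ∈ words.take q.1.toNat))).map (·.2)

-- the dict comprehension: its filter keeps only the first occurrence of each initial, so each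
-- produced key is fresh and the inserts append the pairs in order
def agrupar_por_inicial_alt (lista : List String) : List (String × List String) :=
  let words := lista.map PySem.Str.lower
  (((PySem.List.enumerate words 0).filter
      (fun p => !((words.take p.1.toNat).map pvKf).contains (pvKf p.2))).foldl
    (fun d p => d.insert (pvKf p.2) (pvBucketB words (pvKf p.2))) PySem.Dict.empty).items

-- ===== PRECONDITION & SPEC =====
-- Pre_ excludes lists containing the empty string, on which A (and B) raise IndexError at palavras[0].
def Pre_agrupar_por_inicial (lista : List String) : Prop := ∀ s ∈ lista, s ≠ ""
instance (lista : List String) : Decidable (Pre_agrupar_por_inicial lista) := by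
  unfold Pre_agrupar_por_inicial; infer_instance
def pvWitness_agrupar_por_inicial : List String := ["Ana", "banana", "ana", "Bola"]

def Spec_agrupar_por_inicial (lista : List String) (out : List (String × List String)) : Prop := out = agrupar_por_inicial_alt lista
instance (lista : List String) (out : List (String × List String)) : Decidable (Spec_agrupar_por_inicial lista out) := by unfold Spec_agrupar_por_inicial; infer_instance

-- ===== CLAIM (what is proved, stated in full; the proofs are below) =====
def Claim_equal_agrupar_por_inicial : Prop := ∀ (lista : List String), Dom_agrupar_por_inicial lista → Pre_agrupar_por_inicial lista → Spec_agrupar_por_inicial lista (agrupar_por_inicial lista)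

-- ===== LEMMAS AND PROOFS =====

-- canonical left-to-right "keep the first occurrence" selector with a growing seen-prefix
def pvSelF (c : List String → String → Bool) : List String → List String → List String
  | _, [] => []
  | pre, x :: xs => if c pre x then x :: pvSelF c (pre ++ [x]) xs else pvSelF c (pre ++ [x]) xs

-- A's bucket evolution for one key k, starting from bucket b
def pvBF (k : String) : List String → List String → List String
  | b, [] => b
  | b, x :: xs =>
    if pvKf x == k then (if x ∈ b then pvBF k b xs else pvBF k (b ++ [x]) xs)
    else pvBF k b xs

lemma pv_pyGet_of_ne_nil (s : String) (h : s.toList ≠ []) :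
    ∃ c, PySem.Str.pyGet? s 0 = some c ∧ pvKf s = String.singleton c := by
  cases hl : s.toList with
  | nil => exact absurd hl h
  | cons c cs =>
    have h0 : PySem.Str.pyGet? s 0 = some c := by
      have := PySem.Str.pyGet?_natCast s 0
      simp only [Nat.cast_zero] at this
      rw [this, hl]; rfl
    exact ⟨c, h0, by unfold pvKf; rw [h0]⟩

lemma pv_lower_ne_nil (s : String) (hs : s ≠ "") : (PySem.Str.lower s).toList ≠ [] := by
  rw [PySem.Str.toList_lower]
  intro h
  apply hs
  have : s.toList = [] := by
    by_contra hne
    cases hl : s.toList with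
    | nil => exact hne hl
    | cons a l => rw [hl] at h; simp [PySem.Chars.lower] at h
  exact String.toList_inj.mp (by simpa using this)

-- a filter over enumerate with a prefix-dependent condition is the canonical selector
lemma pv_genEnum (L : List String) (c : List String → String → Bool) :
    ∀ (pre xs : List String), pre ++ xs = L →
    ((PySem.List.enumerate xs (pre.length : Int)).filter
        (fun p => c (L.take p.1.toNat) p.2)).map (·.2)
      = pvSelF c pre xs := by
  intro pre xs
  induction xs generalizing pre with
  | nil => intro _; simp [pvSelF, PySem.List.enumerate_nil]
  | cons x xs ih =>
    intro hL
    have htake : L.take ((pre.length : Int)).toNat = pre := by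
      rw [Int.toNat_natCast, ← hL]; exact List.take_left
    have hlen : (pre.length : Int) + 1 = ((pre ++ [x]).length : Int) := by
      simp [List.length_append]
    have hL' : (pre ++ [x]) ++ xs = L := by simpa [List.append_assoc] using hL
    have hih := ih (pre ++ [x]) hL'
    simp only [List.length_append, List.length_cons, List.length_nil, Nat.zero_add,
      Nat.cast_add, Nat.cast_one] at hih
    rw [PySem.List.enumerate_cons, List.filter_cons]
    simp only [htake]
    cases hc : c pre x <;> simp [pvSelF, hc, hih]

-- keys: the outer selector, mapped through pvKf, is the Set.add fold of the initials
lemma pv_selKeys :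
    ∀ (xs pre s : List String), (∀ k, k ∈ s ↔ k ∈ pre.map pvKf) →
    xs.foldl (fun t w => PySem.Set.add t (pvKf w)) s
      = s ++ (pvSelF (fun pre w => !((pre.map pvKf).contains (pvKf w))) pre xs).map pvKf := by
  intro xs
  induction xs with
  | nil => intro pre s _; simp [pvSelF]
  | cons x xs ih =>
    intro pre s hs
    have hmapx : (pre ++ [x]).map pvKf = pre.map pvKf ++ [pvKf x] := by simp
    simp only [List.foldl_cons]
    by_cases hm : pvKf x ∈ pre.map pvKf
    · have hsm : pvKf x ∈ s := (hs _).mpr hm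
      have hadd : PySem.Set.add s (pvKf x) = s := by simp [PySem.Set.add, hsm]
      have hsel : pvSelF (fun pre w => !((pre.map pvKf).contains (pvKf w))) pre (x :: xs)
          = pvSelF (fun pre w => !((pre.map pvKf).contains (pvKf w))) (pre ++ [x]) xs := by
        simp [pvSelF, hm]
      rw [hadd, hsel]
      apply ih (pre ++ [x]) s
      intro k
      simp only [hmapx, List.mem_append, List.mem_singleton, hs k]
      constructor
      · exact Or.inl
      · rintro (h | rfl)
        · exact h
        · exact hm
    · have hsm : pvKf x ∉ s := fun h => hm ((hs _).mp h)
      have hadd : PySem.Set.add s (pvKf x) = s ++ [pvKf x] := by simp [PySem.Set.add, hsm]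
      have hsel : pvSelF (fun pre w => !((pre.map pvKf).contains (pvKf w))) pre (x :: xs)
          = x :: pvSelF (fun pre w => !((pre.map pvKf).contains (pvKf w))) (pre ++ [x]) xs := by
        simp [pvSelF, hm]
      have hs' : ∀ k, k ∈ s ++ [pvKf x] ↔ k ∈ (pre ++ [x]).map pvKf := by
        intro k
        simp only [hmapx, List.mem_append, List.mem_singleton, hs k]
      rw [hadd, hsel, ih (pre ++ [x]) (s ++ [pvKf x]) hs']
      simp

-- bucket: the inner selector (seen = ALL previous words) equals A's bucket evolution
-- (seen = previous words of THIS initial), since tested words have initial k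
lemma pv_selB (k : String) :
    ∀ (xs pre b : List String), (∀ v, pvKf v = k → (v ∈ pre ↔ v ∈ b)) →
    b ++ pvSelF (fun pre v => pvKf v == k && !decide (v ∈ pre)) pre xs = pvBF k b xs := by
  intro xs
  induction xs with
  | nil => intro pre b _; simp [pvSelF, pvBF]
  | cons x xs ih =>
    intro pre b hpb
    by_cases hk : pvKf x = k
    · by_cases hx : x ∈ pre
      · have hxb : x ∈ b := (hpb x hk).mp hx
        have hsel : pvSelF (fun pre v => pvKf v == k && !decide (v ∈ pre)) pre (x :: xs)
            = pvSelF (fun pre v => pvKf v == k && !decide (v ∈ pre)) (pre ++ [x]) xs := by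
          simp [pvSelF, hx]
        have hbf : pvBF k b (x :: xs) = pvBF k b xs := by simp [pvBF, hk, hxb]
        rw [hsel, hbf]
        apply ih (pre ++ [x]) b
        intro v hv
        simp only [List.mem_append, List.mem_singleton, hpb v hv]
        constructor
        · rintro (h | rfl)
          · exact h
          · exact hxb
        · exact Or.inl
      · have hxb : x ∉ b := fun h => hx ((hpb x hk).mpr h)
        have hsel : pvSelF (fun pre v => pvKf v == k && !decide (v ∈ pre)) pre (x :: xs)
            = x :: pvSelF (fun pre v => pvKf v == k && !decide (v ∈ pre)) (pre ++ [x]) xs := by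
          simp [pvSelF, hk, hx]
        have hbf : pvBF k b (x :: xs) = pvBF k (b ++ [x]) xs := by simp [pvBF, hk, hxb]
        have hpb' : ∀ v, pvKf v = k → (v ∈ pre ++ [x] ↔ v ∈ b ++ [x]) := by
          intro v hv
          simp only [List.mem_append, List.mem_singleton, hpb v hv]
        rw [hsel, hbf, ← ih (pre ++ [x]) (b ++ [x]) hpb']
        simp
    · have hsel : pvSelF (fun pre v => pvKf v == k && !decide (v ∈ pre)) pre (x :: xs)
          = pvSelF (fun pre v => pvKf v == k && !decide (v ∈ pre)) (pre ++ [x]) xs := by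
        simp [pvSelF, hk]
      have hbf : pvBF k b (x :: xs) = pvBF k b xs := by simp [pvBF, hk]
      rw [hsel, hbf]
      apply ih (pre ++ [x]) b
      intro v hv
      simp only [List.mem_append, List.mem_singleton, hpb v hv]
      constructor
      · rintro (h | rfl)
        · exact h
        · exact absurd hv hk
      · exact Or.inl

-- A's loop: keys evolve by Set.add of each word's initial
lemma pv_keysA :
    ∀ (xs : List String) (d : PySem.Dict String (List String)),
    (∀ w ∈ xs, w.toList ≠ []) →
    (xs.foldl pvStepA d).keys = xs.foldl (fun ks w => PySem.Set.add ks (pvKf w)) d.keys := by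
  intro xs
  induction xs with
  | nil => intro d _; simp
  | cons x xs ih =>
    intro d hne
    obtain ⟨c, hc, hkf⟩ := pv_pyGet_of_ne_nil x (hne x (List.mem_cons_self))
    have hcl : PySem.List.pyGet? x.toList 0 = some c := hc
    have hih := fun d' => ih d' (fun w hw => hne w (List.mem_cons_of_mem _ hw))
    simp only [List.foldl_cons]
    cases hg : d.get? (String.singleton c) with
    | none =>
      have hstep : pvStepA d x = d.insert (String.singleton c) [x] := by
        simp [pvStepA, hcl, hg]
      have hnc : d.contains (String.singleton c) = false := by
        rw [PySem.Dict.contains_eq_isSome_get?, hg]; rfl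
      have hnm : String.singleton c ∉ d.keys := by
        rw [← PySem.Dict.contains_iff_mem_keys]; simp [hnc]
      rw [hstep, hih, PySem.Dict.keys_insert_of_not_contains _ _ hnc]
      congr 1
      simp [PySem.Set.add, hkf, hnm]
    | some l =>
      have hcc : d.contains (String.singleton c) = true := by
        rw [PySem.Dict.contains_eq_isSome_get?, hg]; rfl
      have hmm : String.singleton c ∈ d.keys := by
        rw [← PySem.Dict.contains_iff_mem_keys]; exact hcc
      have hadd : PySem.Set.add d.keys (pvKf x) = d.keys := by
        simp [PySem.Set.add, hkf, hmm]
      rw [hadd]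
      by_cases hmem : x ∈ l
      · have hstep : pvStepA d x = d := by
          simp [pvStepA, hcl, hg, hmem]
        rw [hstep, hih]
      · have hstep : pvStepA d x = d.insert (String.singleton c) (l ++ [x]) := by
          simp [pvStepA, hcl, hg, hmem]
        rw [hstep, hih, PySem.Dict.keys_insert_of_contains _ _ hcc]

-- A's loop: the bucket stored at k evolves exactly as pvBF
lemma pv_getDA (k : String) :
    ∀ (xs : List String) (d : PySem.Dict String (List String)),
    (∀ w ∈ xs, w.toList ≠ []) →
    (xs.foldl pvStepA d).getD k [] = pvBF k (d.getD k []) xs := by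
  intro xs
  induction xs with
  | nil => intro d _; simp [pvBF]
  | cons x xs ih =>
    intro d hne
    obtain ⟨c, hc, hkf⟩ := pv_pyGet_of_ne_nil x (hne x (List.mem_cons_self))
    have hcl : PySem.List.pyGet? x.toList 0 = some c := hc
    have hih := fun d' => ih d' (fun w hw => hne w (List.mem_cons_of_mem _ hw))
    simp only [List.foldl_cons]
    by_cases hk : pvKf x = k
    · have hkc : String.singleton c = k := by rw [← hkf, hk]
      cases hg : d.get? (String.singleton c) with
      | none =>
        have hstep : pvStepA d x = d.insert (String.singleton c) [x] := by
          simp [pvStepA, hcl, hg]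
        have hbd : d.getD k [] = [] := by
          rw [← hkc, PySem.Dict.getD_eq_get?_getD, hg]; rfl
        rw [hstep, hih]
        rw [hbd]
        have : pvBF k ([] : List String) (x :: xs) = pvBF k [x] xs := by
          simp [pvBF, hk]
        rw [this]
        congr 1
        rw [← hkc, PySem.Dict.getD_insert_self]
      | some l =>
        have hbd : d.getD k [] = l := by
          rw [← hkc, PySem.Dict.getD_eq_get?_getD, hg]; rfl
        by_cases hmem : x ∈ l
        · have hstep : pvStepA d x = d := by
            simp [pvStepA, hcl, hg, hmem]
          have : pvBF k (d.getD k []) (x :: xs) = pvBF k (d.getD k []) xs := by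
            rw [hbd]; simp [pvBF, hk, hmem]
          rw [this, hstep, hih]
        · have hstep : pvStepA d x = d.insert (String.singleton c) (l ++ [x]) := by
            simp [pvStepA, hcl, hg, hmem]
          have : pvBF k (d.getD k []) (x :: xs) = pvBF k (l ++ [x]) xs := by
            rw [hbd]; simp [pvBF, hk, hmem]
          rw [this, hstep, hih]
          congr 1
          rw [← hkc, PySem.Dict.getD_insert_self]
    · have hkc : String.singleton c ≠ k := by rw [← hkf]; exact hk
      have hbf : pvBF k (d.getD k []) (x :: xs) = pvBF k (d.getD k []) xs := by
        simp [pvBF, hk]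
      rw [hbf]
      cases hg : d.get? (String.singleton c) with
      | none =>
        have hstep : pvStepA d x = d.insert (String.singleton c) [x] := by
          simp [pvStepA, hcl, hg]
        rw [hstep, hih]
        congr 1
        rw [PySem.Dict.getD_insert_of_ne _ _ _ (Ne.symm hkc)]
      | some l =>
        by_cases hmem : x ∈ l
        · have hstep : pvStepA d x = d := by
            simp [pvStepA, hcl, hg, hmem]
          rw [hstep, hih]
        · have hstep : pvStepA d x = d.insert (String.singleton c) (l ++ [x]) := by
            simp [pvStepA, hcl, hg, hmem]
          rw [hstep, hih]
          congr 1
          rw [PySem.Dict.getD_insert_of_ne _ _ _ (Ne.symm hkc)]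

-- A's loop keeps keys duplicate-free
lemma pv_nodupA :
    ∀ (xs : List String) (d : PySem.Dict String (List String)),
    d.keys.Nodup → (xs.foldl pvStepA d).keys.Nodup := by
  intro xs
  induction xs with
  | nil => intro d h; simpa using h
  | cons x xs ih =>
    intro d h
    simp only [List.foldl_cons]
    apply ih
    cases hpg : PySem.Str.pyGet? x 0 with
    | none =>
      have hpgl : PySem.List.pyGet? x.toList 0 = none := hpg
      have hstep : pvStepA d x = d := by simp [pvStepA, hpgl]
      rw [hstep]; exact h
    | some c =>
      have hpgl : PySem.List.pyGet? x.toList 0 = some c := hpg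
      cases hg : d.get? (String.singleton c) with
      | none =>
        have hstep : pvStepA d x = d.insert (String.singleton c) [x] := by
          simp [pvStepA, hpgl, hg]
        rw [hstep]; exact PySem.Dict.nodup_keys_insert _ _ _ h
      | some l =>
        by_cases hmem : x ∈ l
        · have hstep : pvStepA d x = d := by simp [pvStepA, hpgl, hg, hmem]
          rw [hstep]; exact h
        · have hstep : pvStepA d x = d.insert (String.singleton c) (l ++ [x]) := by
            simp [pvStepA, hpgl, hg, hmem]
          rw [hstep]; exact PySem.Dict.nodup_keys_insert _ _ _ h

-- B's value comprehension computed in canonical form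
lemma pv_bucketB_eq (words : List String) (k : String) :
    pvBucketB words k = pvBF k [] words := by
  have h1 :
      ((PySem.List.enumerate words ((([] : List String).length : Nat) : Int)).filter
        (fun p => (fun pre v => pvKf v == k && !decide (v ∈ pre)) (words.take p.1.toNat) p.2)).map (·.2)
      = pvSelF (fun pre v => pvKf v == k && !decide (v ∈ pre)) [] words :=
    pv_genEnum words (fun pre v => pvKf v == k && !decide (v ∈ pre)) [] words rfl
  have h1' : pvBucketB words k
      = pvSelF (fun pre v => pvKf v == k && !decide (v ∈ pre)) [] words := h1
  have h2 := pv_selB k words [] [] (by intro v _; simp)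
  have h3 : pvSelF (fun pre v => pvKf v == k && !decide (v ∈ pre)) [] words
      = pvBF k [] words := by simpa using h2
  exact h1'.trans h3

-- B's outer filter computed in canonical form
lemma pv_outer_eq (words : List String) :
    ((PySem.List.enumerate words 0).filter
        (fun p => !((words.take p.1.toNat).map pvKf).contains (pvKf p.2))).map (·.2)
      = pvSelF (fun pre w => !((pre.map pvKf).contains (pvKf w))) [] words := by
  have h1 :
      ((PySem.List.enumerate words ((([] : List String).length : Nat) : Int)).filter
        (fun p => (fun pre w => !((pre.map pvKf).contains (pvKf w))) (words.take p.1.toNat) p.2)).map (·.2)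
      = pvSelF (fun pre w => !((pre.map pvKf).contains (pvKf w))) [] words :=
    pv_genEnum words (fun pre w => !((pre.map pvKf).contains (pvKf w))) [] words rfl
  simpa using h1

-- the distinct initials, in order
lemma pv_keys_canon (words : List String) :
    (pvSelF (fun pre w => !((pre.map pvKf).contains (pvKf w))) [] words).map pvKf
      = PySem.Set.ofList (words.map pvKf) := by
  have h := pv_selKeys words [] [] (by intro k; simp)
  rw [PySem.Set.ofList_eq_foldl, List.foldl_map]
  simpa using h.symm

-- ===== VERDICT (by name: the statement is the Claim_ definition above) =====
theorem agrupar_por_inicial_spec : Claim_equal_agrupar_por_inicial := by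
  intro lista _ hpre
  unfold Spec_agrupar_por_inicial agrupar_por_inicial agrupar_por_inicial_alt
  set words := lista.map PySem.Str.lower with hwords
  have hne : ∀ w ∈ words, w.toList ≠ [] := by
    intro w hw
    obtain ⟨s, hs, rfl⟩ := List.mem_map.mp hw
    exact pv_lower_ne_nil s (hpre s hs)
  -- A side
  have hA : (lista.foldl (fun d p => pvStepA d (PySem.Str.lower p)) PySem.Dict.empty)
      = words.foldl pvStepA PySem.Dict.empty := by
    rw [hwords, List.foldl_map]
  rw [hA]
  have hnd : (words.foldl pvStepA PySem.Dict.empty).keys.Nodup :=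
    pv_nodupA words _ (by simp)
  rw [PySem.Dict.items_eq_map_keys _ hnd []]
  have hkeys : (words.foldl pvStepA PySem.Dict.empty).keys
      = PySem.Set.ofList (words.map pvKf) := by
    rw [pv_keysA words _ hne, PySem.Set.ofList_eq_foldl]
    conv_rhs => rw [List.foldl_map]
    rfl
  have hget : ∀ k, (words.foldl pvStepA PySem.Dict.empty).getD k [] = pvBF k [] words := by
    intro k
    rw [pv_getDA k words _ hne]
    rfl
  -- B side
  set l := (PySem.List.enumerate words 0).filter
      (fun p => !((words.take p.1.toNat).map pvKf).contains (pvKf p.2)) with hl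
  have hmapkf : l.map (fun p => pvKf p.2) = PySem.Set.ofList (words.map pvKf) := by
    have : l.map (fun p => pvKf p.2) = (l.map (·.2)).map pvKf := by
      rw [List.map_map]; rfl
    rw [this, hl, pv_outer_eq, pv_keys_canon]
  have hfresh : ∀ p ∈ l, (PySem.Dict.empty : PySem.Dict String (List String)).contains (pvKf p.2) = false := by
    intro p _; simp
  have hndB : (l.map (fun p => pvKf p.2)).Nodup := by
    rw [hmapkf]; exact PySem.Set.nodup_ofList _
  rw [PySem.Dict.items_foldl_insert_fresh l _ _ _ hfresh hndB]
  have hBmap : l.map (fun p => (pvKf p.2, pvBucketB words (pvKf p.2)))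
      = (l.map (fun p => pvKf p.2)).map (fun k => (k, pvBucketB words k)) := by
    rw [List.map_map]; rfl
  rw [hBmap, hmapkf]
  simp only [hkeys, hget, pv_bucketB_eq]
  rfl
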